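-- pv_equiv track=rewrite | github.com/robwec/shadowverse-worlds-beyond-set-pricer | shadowverse-set-pricer.py | calculateCollectionSmeltWorth_forSet
-- ===== SOURCE A (Python) =====
-- bronze_smelt_value = 10
--
-- silver_smelt_value = 20
--
-- gold_smelt_value = 200
--
-- legendary_smelt_value = 1200
--
-- def calculateCollectionSmeltWorth_forSet(mycollection, mysetcardlist):
-- 	total_vial_value = 0
--
-- 	set_bronzes = [x for x in mysetcardlist if 'bronze' in x]
-- 	for i in range(len(set_bronzes)):
-- 		thisbronze = set_bronzes[i]
-- 		total_vial_value += bronze_smelt_value*max(0, mycollection[thisbronze]-3)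
--
-- 	set_silvers = [x for x in mysetcardlist if 'silver' in x]
-- 	for i in range(len(set_silvers)):
-- 		thissilver = set_silvers[i]
-- 		total_vial_value += silver_smelt_value*max(0, mycollection[thissilver]-3)
--
-- 	set_golds = [x for x in mysetcardlist if 'gold' in x]
-- 	for i in range(len(set_golds)):
-- 		thisgold = set_golds[i]
-- 		total_vial_value += gold_smelt_value*max(0, mycollection[thisgold]-3)
--
-- 	set_legendaries = [x for x in mysetcardlist if 'legendary' in x]
-- 	for i in range(len(set_legendaries)):
-- 		thislegendary = set_legendaries[i]
-- 		total_vial_value += legendary_smelt_value*max(0, mycollection[thislegendary]-3)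
--
-- 	return total_vial_value
-- ===== SOURCE B (Python) =====
-- def calculateCollectionSmeltWorth_forSet(mycollection, mysetcardlist):
--     smelt_values = {'bronze': 10, 'silver': 20, 'gold': 200, 'legendary': 1200}
--     total_vial_value = 0
--     for card in mysetcardlist:
--         for rarity, value in smelt_values.items():
--             if rarity in card:
--                 total_vial_value += value * max(0, mycollection[card] - 3)
--     return total_vial_value
-- ===== Notes on version B (the rewrite author's own statement) =====
-- stated objective: simpler
-- what changed: Replaces four separate filter-then-index loops (one per rarity) by a single pass over the card list with a rarity->smelt-value lookup table, testing each rarity independently per card.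
import Mathlib
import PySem

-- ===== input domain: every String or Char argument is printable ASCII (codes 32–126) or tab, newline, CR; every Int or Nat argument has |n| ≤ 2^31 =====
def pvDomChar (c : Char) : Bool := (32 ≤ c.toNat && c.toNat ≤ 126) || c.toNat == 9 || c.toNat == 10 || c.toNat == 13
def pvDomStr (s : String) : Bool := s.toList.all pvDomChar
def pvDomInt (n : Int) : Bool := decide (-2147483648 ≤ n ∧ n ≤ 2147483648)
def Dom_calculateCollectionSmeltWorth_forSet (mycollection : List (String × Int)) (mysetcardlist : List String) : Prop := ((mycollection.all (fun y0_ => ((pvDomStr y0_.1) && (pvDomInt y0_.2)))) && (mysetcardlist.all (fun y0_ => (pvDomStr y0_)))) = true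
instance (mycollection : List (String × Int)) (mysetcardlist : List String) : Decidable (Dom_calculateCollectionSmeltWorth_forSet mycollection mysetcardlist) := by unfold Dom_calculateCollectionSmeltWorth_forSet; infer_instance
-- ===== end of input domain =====

-- B replaces A's four filter-then-index loops by a single pass with a rarity→value lookup
-- table (objective: simpler). Equivalence is about the return value; neither mutates its arguments.

-- ===== PORT A =====
-- dict lookup mycollection[c]; Pre_ guarantees the key is present, so getD 0 is never taken
def pvLookup (mycollection : List (String × Int)) (c : String) : Int :=
  ((PySem.Dict.mk mycollection).get? c).getD 0

def calculateCollectionSmeltWorth_forSet (mycollection : List (String × Int)) (mysetcardlist : List String) : Int :=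
  let set_bronzes := mysetcardlist.filter (fun x => PySem.Str.isIn "bronze" x)
  let t1 := (PySem.List.pyRange 0 ((set_bronzes.length : Int)) 1).foldl
    (fun acc i => acc + 10 * max 0 (pvLookup mycollection (PySem.List.pyGetD set_bronzes i "") - 3)) 0
  let set_silvers := mysetcardlist.filter (fun x => PySem.Str.isIn "silver" x)
  let t2 := (PySem.List.pyRange 0 ((set_silvers.length : Int)) 1).foldl
    (fun acc i => acc + 20 * max 0 (pvLookup mycollection (PySem.List.pyGetD set_silvers i "") - 3)) t1
  let set_golds := mysetcardlist.filter (fun x => PySem.Str.isIn "gold" x)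
  let t3 := (PySem.List.pyRange 0 ((set_golds.length : Int)) 1).foldl
    (fun acc i => acc + 200 * max 0 (pvLookup mycollection (PySem.List.pyGetD set_golds i "") - 3)) t2
  let set_legendaries := mysetcardlist.filter (fun x => PySem.Str.isIn "legendary" x)
  (PySem.List.pyRange 0 ((set_legendaries.length : Int)) 1).foldl
    (fun acc i => acc + 1200 * max 0 (pvLookup mycollection (PySem.List.pyGetD set_legendaries i "") - 3)) t3

-- ===== PORT B =====
def pvSmeltTable : List (String × Int) :=
  [("bronze", 10), ("silver", 20), ("gold", 200), ("legendary", 1200)]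

def calculateCollectionSmeltWorth_forSet_alt (mycollection : List (String × Int)) (mysetcardlist : List String) : Int :=
  mysetcardlist.foldl (fun tot card =>
    pvSmeltTable.foldl (fun tot rv =>
      if PySem.Str.isIn rv.1 card then
        tot + rv.2 * max 0 (pvLookup mycollection card - 3)
      else tot) tot) 0

-- ===== PRECONDITION & SPEC =====
-- Pre_ excludes exactly the inputs on which Python A raises KeyError (a card containing a
-- rarity substring that is not a key of mycollection); B raises there as well.
def Pre_calculateCollectionSmeltWorth_forSet (mycollection : List (String × Int)) (mysetcardlist : List String) : Prop :=
  ∀ x ∈ mysetcardlist,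
    (PySem.Str.isIn "bronze" x = true ∨ PySem.Str.isIn "silver" x = true ∨
     PySem.Str.isIn "gold" x = true ∨ PySem.Str.isIn "legendary" x = true) →
    ((PySem.Dict.mk mycollection).get? x).isSome = true
instance (mycollection : List (String × Int)) (mysetcardlist : List String) : Decidable (Pre_calculateCollectionSmeltWorth_forSet mycollection mysetcardlist) := by unfold Pre_calculateCollectionSmeltWorth_forSet; infer_instance

def pvWitness_calculateCollectionSmeltWorth_forSet : (List (String × Int)) × List String :=
  ([("bronze knight", 5), ("gold mage", 2)], ["bronze knight", "gold mage", "token"])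

def Spec_calculateCollectionSmeltWorth_forSet (mycollection : List (String × Int)) (mysetcardlist : List String) (out : Int) : Prop := out = calculateCollectionSmeltWorth_forSet_alt mycollection mysetcardlist
instance (mycollection : List (String × Int)) (mysetcardlist : List String) (out : Int) : Decidable (Spec_calculateCollectionSmeltWorth_forSet mycollection mysetcardlist out) := by unfold Spec_calculateCollectionSmeltWorth_forSet; infer_instance

-- ===== CLAIM (what is proved, stated in full; the proofs are below) =====
def Claim_equal_calculateCollectionSmeltWorth_forSet : Prop := ∀ (mycollection : List (String × Int)) (mysetcardlist : List String), Dom_calculateCollectionSmeltWorth_forSet mycollection mysetcardlist → Pre_calculateCollectionSmeltWorth_forSet mycollection mysetcardlist → Spec_calculateCollectionSmeltWorth_forSet mycollection mysetcardlist (calculateCollectionSmeltWorth_forSet mycollection mysetcardlist)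

-- ===== LEMMAS AND PROOFS =====

-- Σ over a filtered list as a Σ of guarded terms over the whole list
theorem pv_sum_filter_map {α : Type} (p : α → Bool) (f : α → Int) (l : List α) :
    ((l.filter p).map f).sum = (l.map (fun x => if p x then f x else 0)).sum := by
  induction l with
  | nil => rfl
  | cons a l ih =>
    by_cases h : p a = true <;> simp [h, ih]

-- glue: a map over range(len(xs)) indexing xs is a map over xs
theorem pv_sum_pyRange (xs : List String) (g : String → Int) :
    ((PySem.List.pyRange 0 ((xs.length : Int)) 1).map (fun i => g (PySem.List.pyGetD xs i ""))).sum
      = (xs.map g).sum := by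
  rw [show (fun i => g (PySem.List.pyGetD xs i "")) = g ∘ (fun i => PySem.List.pyGetD xs i "") from rfl,
      ← List.map_map, PySem.List.map_pyGetD_pyRange_zero']

theorem calculateCollectionSmeltWorth_forSet_spec' :
    ∀ (mycollection : List (String × Int)) (mysetcardlist : List String),
      calculateCollectionSmeltWorth_forSet mycollection mysetcardlist
        = calculateCollectionSmeltWorth_forSet_alt mycollection mysetcardlist := by
  intro coll lst
  unfold calculateCollectionSmeltWorth_forSet calculateCollectionSmeltWorth_forSet_alt
  -- each additive index loop is init + a sum over range(len); then re-index to the list itself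
  simp only [PySem.List.foldl_add]
  rw [pv_sum_pyRange (lst.filter (fun x => PySem.Str.isIn "bronze" x)) (fun c => 10 * max 0 (pvLookup coll c - 3)),
      pv_sum_pyRange (lst.filter (fun x => PySem.Str.isIn "silver" x)) (fun c => 20 * max 0 (pvLookup coll c - 3)),
      pv_sum_pyRange (lst.filter (fun x => PySem.Str.isIn "gold" x)) (fun c => 200 * max 0 (pvLookup coll c - 3)),
      pv_sum_pyRange (lst.filter (fun x => PySem.Str.isIn "legendary" x)) (fun c => 1200 * max 0 (pvLookup coll c - 3))]
  -- B: unfold the 4-entry table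
  simp only [pvSmeltTable, List.foldl_cons, List.foldl_nil]
  have hB : ∀ (init : Int),
      lst.foldl (fun tot card =>
        let t1 := if PySem.Str.isIn "bronze" card then tot + 10 * max 0 (pvLookup coll card - 3) else tot
        let t2 := if PySem.Str.isIn "silver" card then t1 + 20 * max 0 (pvLookup coll card - 3) else t1
        let t3 := if PySem.Str.isIn "gold" card then t2 + 200 * max 0 (pvLookup coll card - 3) else t2
        if PySem.Str.isIn "legendary" card then t3 + 1200 * max 0 (pvLookup coll card - 3) else t3) init
      = init + (lst.map (fun card =>
          (if PySem.Str.isIn "bronze" card then 10 * max 0 (pvLookup coll card - 3) else 0)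
          + (if PySem.Str.isIn "silver" card then 20 * max 0 (pvLookup coll card - 3) else 0)
          + (if PySem.Str.isIn "gold" card then 200 * max 0 (pvLookup coll card - 3) else 0)
          + (if PySem.Str.isIn "legendary" card then 1200 * max 0 (pvLookup coll card - 3) else 0))).sum := by
    induction lst with
    | nil => intro init; simp
    | cons a l ih =>
      intro init
      simp only [List.foldl_cons, List.map_cons, List.sum_cons, ih]
      split_ifs <;> ring
  rw [hB]
  rw [pv_sum_filter_map, pv_sum_filter_map, pv_sum_filter_map, pv_sum_filter_map]
  simp only [PySem.List.sum_map_add_int]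
  ring

-- ===== VERDICT (by name: the statement is the Claim_ definition above) =====
theorem calculateCollectionSmeltWorth_forSet_spec : Claim_equal_calculateCollectionSmeltWorth_forSet := by
  intro coll lst _ _
  exact calculateCollectionSmeltWorth_forSet_spec' coll lst
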